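-- pv_equiv track=rewrite | github.com/guo-ou/6.009 | quiz3_dir/q3_problems/quiz.py | capture
-- ===== SOURCE A (Python) =====
-- def has_liberty(board,row,col,seen=None):
--     """Return ``True`` if stone at intersection (`row`, `col`) has
--     at least one liberty or if there is no stone at the
--     intersection, ''False'' if the stone has no liberties."""
--
--
--     if seen is None:
--         seen = set()
--
--
--     if board[row][col] == ".":
--         return True
--
--     else:
--         for ix in range(-1,2):
--             for iy in range(-1,2):
--                 if not (ix == 0 or iy == 0):
--                     continue
--
--                 if ix == iy:
--                     continue
--
--                 if 0 <= row + ix < len(board) and 0 <= col + iy < len(board[0]) and board[row + ix][col + iy] in [board[row][col], "."]and (row + ix, col + iy) not in seen: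
--                     seen.add((row, col))
--
--                     if has_liberty(board, row + ix, col + iy, seen):
--                         return True
--
--         return False
--
-- def capture(board,color):
--     """Return updated `board` with all the captured stones of
--     specified `color` removed."""
--     outboard = []
--     for r in range(len(board)):
--         row = ""
--         for c in range(len(board[0])):
--             if not has_liberty(board, r, c) and board[r][c] == color:
--                 row += "."
--             else:
--                 row += board[r][c]
--
--         outboard.append(row)
--
--     return outboard
-- ===== SOURCE B (Python) =====
-- def capture(board, color):
--     """Return updated `board` with all the captured stones of
--     specified `color` removed.  One global saturation: grow the set of
--     alive stones from the liberties instead of a fresh DFS per cell."""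
--     h = len(board)
--     if h == 0:
--         return []
--     w = len(board[0])
--     nbrs = ((-1, 0), (0, -1), (0, 1), (1, 0))
--     alive = set()
--     changed = True
--     while changed:
--         changed = False
--         for r in range(h):
--             for c in range(w):
--                 if board[r][c] != "." and (r, c) not in alive and any(
--                         0 <= r + dr < h and 0 <= c + dc < w and
--                         (board[r + dr][c + dc] == "." or
--                          ((r + dr, c + dc) in alive and
--                           board[r + dr][c + dc] == board[r][c]))
--                         for dr, dc in nbrs):
--                     alive.add((r, c))
--                     changed = True
--     return ["".join("." if board[r][c] == color and (r, c) not in alive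
--                     else board[r][c] for c in range(w)) for r in range(h)]
-- ===== Notes on version B (the rewrite author's own statement) =====
-- stated objective: faster
-- what changed: A runs a fresh recursive DFS (has_liberty, with a shared seen set) for every cell of the board; B instead computes once, by a global fixpoint sweep, the set of stones that can reach an empty intersection (seeding from the liberties and growing through same-colour neighbours until no change), then rebuilds the board from that one set.
import Mathlib
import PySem

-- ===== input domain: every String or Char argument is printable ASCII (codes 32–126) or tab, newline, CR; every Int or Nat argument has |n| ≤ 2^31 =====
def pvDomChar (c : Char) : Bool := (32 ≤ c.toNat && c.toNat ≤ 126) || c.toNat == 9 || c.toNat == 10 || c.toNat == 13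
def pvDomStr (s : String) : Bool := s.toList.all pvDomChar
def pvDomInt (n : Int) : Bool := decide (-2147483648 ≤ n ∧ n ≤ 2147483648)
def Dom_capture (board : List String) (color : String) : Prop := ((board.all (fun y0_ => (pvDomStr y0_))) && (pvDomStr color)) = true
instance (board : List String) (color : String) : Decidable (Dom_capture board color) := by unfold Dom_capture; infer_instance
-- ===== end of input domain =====

-- B replaces A's fresh recursive DFS per cell by ONE global saturation of the set of
-- alive stones grown from the empty intersections (objective: faster on boards with
-- large captured groups; measured).
-- Return-value equivalence only; neither program mutates its arguments.

-- ===== PORT A =====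

-- board[r][c]; every access that the Python actually performs is guarded in-bounds
-- (and rows are long enough under Pre_capture), where this equals Python exactly.
def pvCell (b : List String) (r c : Int) : Char :=
  ((b.getD r.toNat "").toList.getD c.toNat '?')

-- the pairs (ix, iy) produced by "for ix in range(-1,2): for iy in range(-1,2)"
def pvOffsets : List (Int × Int) :=
  [(-1, -1), (-1, 0), (-1, 1), (0, -1), (0, 0), (0, 1), (1, -1), (1, 0), (1, 1)]

-- one iteration of has_liberty's double loop (acc.1 = "already returned True",
-- acc.2 = the mutable set `seen`, threaded; `rec` is the recursive call)
def pvHLStep (b : List String) (row col : Int)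
    (rec : Int → Int → List (Int × Int) → Bool × List (Int × Int))
    (acc : Bool × List (Int × Int)) (off : Int × Int) : Bool × List (Int × Int) :=
  match acc with
  | (true, s) => (true, s)
  | (false, s) =>
    if ¬(off.1 = 0 ∨ off.2 = 0) then (false, s)
    else if off.1 = off.2 then (false, s)
    else if 0 ≤ row + off.1 ∧ row + off.1 < (b.length : Int) ∧ 0 ≤ col + off.2 ∧
        col + off.2 < ((b.headD "").length : Int) ∧
        (pvCell b (row + off.1) (col + off.2) = pvCell b row col ∨
         pvCell b (row + off.1) (col + off.2) = '.') ∧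
        (row + off.1, col + off.2) ∉ s then
      rec (row + off.1) (col + off.2) (PySem.Set.add s (row, col))
    else (false, s)

-- has_liberty; `fuel` is a pure totality guard: the Python recursion has depth
-- ≤ cells+1 (each level inserts a fresh cell into `seen`), so fuel = cells+2 below
-- is never exhausted on the calls `capture` makes.
def pvHL (b : List String) : Nat → Int → Int → List (Int × Int) → Bool × List (Int × Int)
  | 0, _, _, seen => (false, seen)
  | Nat.succ fuel, row, col, seen =>
    if pvCell b row col = '.' then (true, seen)
    else pvOffsets.foldl (pvHLStep b row col (pvHL b fuel)) (false, seen)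

def pvFuel (b : List String) : Nat := b.length * (b.headD "").length + 2

def capture (board : List String) (color : String) : List String :=
  (PySem.List.pyRange 0 (board.length : Int) 1).foldl
    (fun outboard r =>
      outboard ++ [(PySem.List.pyRange 0 ((board.headD "").length : Int) 1).foldl
        (fun row c =>
          if (pvHL board (pvFuel board) r c []).1 = false ∧
              String.ofList [pvCell board r c] = color
          then row.push '.'
          else row.push (pvCell board r c)) ""])
    []

-- ===== PORT B =====

def pvNbrs : List (Int × Int) := [(-1, 0), (0, -1), (0, 1), (1, 0)]

-- the body of B's double loop: add (r,c) to `alive` (and set `changed`) if some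
-- neighbour is empty or an alive stone of the same colour
def pvSweepCell (b : List String) (st : List (Int × Int) × Bool) (r c : Int) :
    List (Int × Int) × Bool :=
  if pvCell b r c ≠ '.' ∧ (r, c) ∉ st.1 ∧ pvNbrs.any (fun d =>
       decide (0 ≤ r + d.1 ∧ r + d.1 < (b.length : Int) ∧ 0 ≤ c + d.2 ∧
               c + d.2 < ((b.headD "").length : Int)) &&
       (pvCell b (r + d.1) (c + d.2) == '.' ||
        (decide ((r + d.1, c + d.2) ∈ st.1) &&
         pvCell b (r + d.1) (c + d.2) == pvCell b r c)))
  then (PySem.Set.add st.1 (r, c), true) else st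

-- one pass of B's while-loop body over all cells
def pvSweep (b : List String) (alive : List (Int × Int)) : List (Int × Int) × Bool :=
  (PySem.List.pyRange 0 (b.length : Int) 1).foldl
    (fun st r => (PySem.List.pyRange 0 ((b.headD "").length : Int) 1).foldl
      (fun st c => pvSweepCell b st r c) st)
    (alive, false)

-- B's "while changed" loop; fuel = cells+2 is a pure totality guard: every sweep
-- that reports a change strictly enlarges `alive` ⊆ cells, so it is never exhausted.
def pvLoopB (b : List String) : Nat → List (Int × Int) → List (Int × Int)
  | 0, alive => alive
  | Nat.succ fuel, alive =>
    let st := pvSweep b alive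
    if st.2 then pvLoopB b fuel st.1 else st.1

def capture_alt (board : List String) (color : String) : List String :=
  if board.length = 0 then []
  else
    let alive := pvLoopB board (pvFuel board) []
    (PySem.List.pyRange 0 (board.length : Int) 1).map (fun r =>
      String.ofList ((PySem.List.pyRange 0 ((board.headD "").length : Int) 1).map (fun c =>
        if String.ofList [pvCell board r c] = color ∧ (r, c) ∉ alive then '.'
        else pvCell board r c)))

-- ===== PRECONDITION & SPEC =====

-- Pre_ excludes exactly the ragged boards having some row shorter than row 0:
-- there Python A raises IndexError (and Python B raises the same IndexError).
def Pre_capture (board : List String) (color : String) : Prop :=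
  ∀ s ∈ board, (board.headD "").length ≤ s.length

instance (board : List String) (color : String) : Decidable (Pre_capture board color) := by
  unfold Pre_capture; infer_instance

def pvWitness_capture : List String × String := (["xo", ".."], "x")

def Spec_capture (board : List String) (color : String) (out : List String) : Prop :=
  out = capture_alt board color
instance (board : List String) (color : String) (out : List String) :
    Decidable (Spec_capture board color out) := by unfold Spec_capture; infer_instance

-- ===== CLAIM (what is proved, stated in full; the proofs are below) =====
def Claim_equal_capture : Prop := ∀ (board : List String) (color : String),
  Dom_capture board color → Pre_capture board color →
  Spec_capture board color (capture board color)

-- ===== LEMMAS AND PROOFS =====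

-- Semantic vocabulary: positions, adjacency, eligibility, "reaches a liberty"
def pvH (b : List String) : Int := (b.length : Int)
def pvW (b : List String) : Int := ((b.headD "").length : Int)
def pvAt (b : List String) (p : Int × Int) : Char := pvCell b p.1 p.2
abbrev pvInB (b : List String) (p : Int × Int) : Prop :=
  0 ≤ p.1 ∧ p.1 < pvH b ∧ 0 ≤ p.2 ∧ p.2 < pvW b
def pvAdj (p q : Int × Int) : Prop :=
  q = (p.1 - 1, p.2) ∨ q = (p.1, p.2 - 1) ∨ q = (p.1, p.2 + 1) ∨ q = (p.1 + 1, p.2)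
def pvElig (b : List String) (p q : Int × Int) : Prop :=
  pvAdj p q ∧ pvInB b q ∧ (pvAt b q = pvAt b p ∨ pvAt b q = '.')

-- "(the stone at) p can reach an empty intersection"
inductive pvLib (b : List String) : Int × Int → Prop
  | dot (p : Int × Int) : pvInB b p → pvAt b p = '.' → pvLib b p
  | step (p q : Int × Int) : pvInB b p → pvAt b p ≠ '.' → pvElig b p q →
      pvLib b q → pvLib b p

-- dead end: every eligible neighbour is a stone inside C
def pvDE (b : List String) (C : Int × Int → Prop) (q : Int × Int) : Prop :=
  ∀ z, pvElig b q z → pvAt b z ≠ '.' ∧ C z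
-- closed set of stones: no member can escape towards a liberty
def pvClosed (b : List String) (C : Int × Int → Prop) : Prop :=
  ∀ p, C p → pvAt b p ≠ '.' ∧
    ∀ q, pvElig b p q → pvAt b q ≠ '.' ∧ (C q ∨ pvDE b C q)

lemma pvDE_mono {b : List String} {C C' : Int × Int → Prop}
    (h : ∀ x, C x → C' x) {q : Int × Int} (hq : pvDE b C q) : pvDE b C' q := by
  intro z hz; exact ⟨(hq z hz).1, h _ (hq z hz).2⟩

lemma pvClosed_noLib {b : List String} {C : Int × Int → Prop} (hC : pvClosed b C) :
    ∀ p, pvLib b p → ¬ C p ∧ ¬ (pvAt b p ≠ '.' ∧ pvDE b C p) := by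
  intro p hp
  induction hp with
  | dot p hin hdot =>
    constructor
    · intro hCp; exact (hC p hCp).1 hdot
    · rintro ⟨hne, -⟩; exact hne hdot
  | step p q hin hst helig hlib ih =>
    constructor
    · intro hCp
      rcases (hC p hCp).2 q helig with ⟨hqne, hCq | hDEq⟩
      · exact ih.1 hCq
      · exact ih.2 ⟨hqne, hDEq⟩
    · rintro ⟨-, hDE⟩
      rcases hDE q helig with ⟨hqne, hCq⟩
      exact ih.1 hCq

lemma pvCard {b : List String} {s : List (Int × Int)} (hnd : s.Nodup)
    (hin : ∀ q ∈ s, pvInB b q) : (s.length : Int) ≤ pvH b * pvW b := by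
  have hsub : s.toFinset ⊆ Finset.Ico 0 (pvH b) ×ˢ Finset.Ico 0 (pvW b) := by
    intro x hx
    rcases hin x (List.mem_toFinset.mp hx) with ⟨h1, h2, h3, h4⟩
    simp [Finset.mem_product, Finset.mem_Ico]
    exact ⟨⟨h1, h2⟩, h3, h4⟩
  have hcard := Finset.card_le_card hsub
  rw [List.toFinset_card_of_nodup hnd, Finset.card_product] at hcard
  have hH : (0:Int) ≤ pvH b := by simp [pvH]
  have hW : (0:Int) ≤ pvW b := by simp [pvW]
  calc (s.length : Int) ≤ ((Finset.Ico (0:Int) (pvH b)).card *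
        (Finset.Ico (0:Int) (pvW b)).card : Nat) := by exact_mod_cast hcard
    _ = pvH b * pvW b := by
        rw [Int.card_Ico, Int.card_Ico]
        push_cast [Int.toNat_of_nonneg (by omega : (0:Int) ≤ pvH b - 0),
          Int.toNat_of_nonneg (by omega : (0:Int) ≤ pvW b - 0)]
        ring

lemma pvAddLen {s t : List (Int × Int)} {p : Int × Int} (hnds : s.Nodup)
    (hndt : t.Nodup) (hsub : s ⊆ t) (hp : p ∉ s) :
    s.length + 1 ≤ (PySem.Set.add t p).length := by
  have hndtp : (PySem.Set.add t p).Nodup := PySem.Set.nodup_add t p hndt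
  have hsub2 : insert p s.toFinset ⊆ (PySem.Set.add t p).toFinset := by
    intro x hx
    rcases Finset.mem_insert.mp hx with rfl | hx
    · exact List.mem_toFinset.mpr (by simp [PySem.Set.mem_add])
    · exact List.mem_toFinset.mpr
        (by simp [PySem.Set.mem_add]; left; exact hsub (List.mem_toFinset.mp hx))
  have := Finset.card_le_card hsub2
  rw [Finset.card_insert_of_notMem (by simpa using hp),
    List.toFinset_card_of_nodup hnds, List.toFinset_card_of_nodup hndtp] at this
  omega

-- adjacency = one of the four "real" offsets of A's 3×3 loop
lemma pvAdj_iff {p q : Int × Int} :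
    pvAdj p q ↔ ∃ off ∈ pvOffsets, (off.1 = 0 ∨ off.2 = 0) ∧ off.1 ≠ off.2 ∧
      q = (p.1 + off.1, p.2 + off.2) := by
  constructor
  · rintro (rfl | rfl | rfl | rfl)
    · exact ⟨(-1, 0), by simp [pvOffsets], by simp, by simp, by simp; ring⟩
    · exact ⟨(0, -1), by simp [pvOffsets], by simp, by simp, by simp; ring⟩
    · exact ⟨(0, 1), by simp [pvOffsets], by simp, by simp, by simp⟩
    · exact ⟨(1, 0), by simp [pvOffsets], by simp, by simp, by simp⟩
  · rintro ⟨off, hmem, hreal, hne, rfl⟩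
    simp [pvOffsets] at hmem
    unfold pvAdj
    rcases hmem with rfl | rfl | rfl | rfl | rfl | rfl | rfl | rfl | rfl <;>
      simp_all <;> constructor <;> ring

-- ---------- A side: the DFS returns true iff a liberty is reachable ----------

-- the guard of has_liberty's innermost if (bounds, colour, not seen)
abbrev pvGuard (b : List String) (row col : Int) (off : Int × Int)
    (s : List (Int × Int)) : Prop :=
  0 ≤ row + off.1 ∧ row + off.1 < (b.length : Int) ∧ 0 ≤ col + off.2 ∧
  col + off.2 < ((b.headD "").length : Int) ∧
  (pvCell b (row + off.1) (col + off.2) = pvCell b row col ∨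
   pvCell b (row + off.1) (col + off.2) = '.') ∧
  (row + off.1, col + off.2) ∉ s

lemma pvHLStep_true (b : List String) (row col : Int)
    (rec : Int → Int → List (Int × Int) → Bool × List (Int × Int))
    (s : List (Int × Int)) (off : Int × Int) :
    pvHLStep b row col rec (true, s) off = (true, s) := rfl

lemma pvHLStep_false (b : List String) (row col : Int)
    (rec : Int → Int → List (Int × Int) → Bool × List (Int × Int))
    (s : List (Int × Int)) (off : Int × Int) :
    pvHLStep b row col rec (false, s) off =
      if (off.1 = 0 ∨ off.2 = 0) ∧ off.1 ≠ off.2 ∧ pvGuard b row col off s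
      then rec (row + off.1) (col + off.2) (PySem.Set.add s (row, col))
      else (false, s) := by
  by_cases h1 : (off.1 = 0 ∨ off.2 = 0) <;>
    by_cases h2 : off.1 = off.2 <;>
      by_cases h3 : pvGuard b row col off s <;>
        simp_all [pvHLStep, pvGuard]

lemma pvFold_pass (b : List String) (row col : Int)
    (rec : Int → Int → List (Int × Int) → Bool × List (Int × Int)) :
    ∀ (offs : List (Int × Int)) (s : List (Int × Int)),
    offs.foldl (pvHLStep b row col rec) (true, s) = (true, s) := by
  intro offs
  induction offs with
  | nil => intro s; rfl
  | cons off offs ih => intro s; simpa [pvHLStep_true] using ih s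

lemma pvFold_true (b : List String) (row col : Int)
    (rec : Int → Int → List (Int × Int) → Bool × List (Int × Int)) :
    ∀ (offs : List (Int × Int)) (t s' : List (Int × Int)),
    offs.foldl (pvHLStep b row col rec) (false, t) = (true, s') →
    ∃ off ∈ offs, ∃ t₀ u, (off.1 = 0 ∨ off.2 = 0) ∧ off.1 ≠ off.2 ∧
      pvGuard b row col off t₀ ∧
      rec (row + off.1) (col + off.2) (PySem.Set.add t₀ (row, col)) = (true, u) := by
  intro offs
  induction offs with
  | nil => intro t s' h; simp at h
  | cons off offs ih =>
    intro t s' h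
    rw [List.foldl_cons, pvHLStep_false] at h
    by_cases hg : (off.1 = 0 ∨ off.2 = 0) ∧ off.1 ≠ off.2 ∧ pvGuard b row col off t
    · rw [if_pos hg] at h
      rcases hrec : rec (row + off.1) (col + off.2) (PySem.Set.add t (row, col)) with ⟨bb, u⟩
      rw [hrec] at h
      cases bb with
      | true => exact ⟨off, by simp, t, u, hg.1, hg.2.1, hg.2.2, hrec⟩
      | false =>
        rcases ih u s' h with ⟨o, ho, t₀, u', rest⟩
        exact ⟨o, by simp [ho], t₀, u', rest⟩
    · rw [if_neg hg] at h
      rcases ih t s' h with ⟨o, ho, t₀, u', rest⟩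
      exact ⟨o, by simp [ho], t₀, u', rest⟩


lemma pvHL_true (b : List String) : ∀ (fuel : Nat) (row col : Int)
    (s s' : List (Int × Int)), pvHL b fuel row col s = (true, s') →
    pvInB b (row, col) → pvLib b (row, col) := by
  intro fuel
  induction fuel with
  | zero => intro row col s s' h hin; simp [pvHL] at h
  | succ fuel ih =>
    intro row col s s' h hin
    rw [pvHL] at h
    by_cases hdot : pvCell b row col = '.'
    · exact pvLib.dot _ hin (by simpa [pvAt] using hdot)
    · rw [if_neg hdot] at h
      rcases pvFold_true b row col (pvHL b fuel) pvOffsets s s' h with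
        ⟨off, hmem, t₀, u, h1, h2, hg, hrec⟩
      have hinq : pvInB b (row + off.1, col + off.2) := ⟨hg.1, hg.2.1, hg.2.2.1, hg.2.2.2.1⟩
      have hlibq := ih (row + off.1) (col + off.2) _ _ hrec hinq
      refine pvLib.step _ (row + off.1, col + off.2) hin (by simpa [pvAt] using hdot) ?_ hlibq
      refine ⟨pvAdj_iff.mpr ⟨off, hmem, h1, h2, rfl⟩, hinq, ?_⟩
      simpa [pvAt] using hg.2.2.2.2.1

-- "good fact" recorded for every cell the failing DFS visited: each eligible
-- neighbour is a stone and is either itself visited or a dead end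
def pvGF (b : List String) (root : Int × Int) (s' : List (Int × Int))
    (q : Int × Int) : Prop :=
  pvInB b q ∧ pvAt b q ≠ '.' ∧ ∀ z, pvElig b q z → pvAt b z ≠ '.' ∧
    ((z ∈ s' ∨ z = root) ∨ pvDE b (fun y => y ∈ s' ∨ y = root) z)

lemma pvGF_embed {b : List String} {root1 root2 : Int × Int}
    {s1 s2 : List (Int × Int)} {q : Int × Int}
    (h : ∀ y, (y ∈ s1 ∨ y = root1) → (y ∈ s2 ∨ y = root2)) :
    pvGF b root1 s1 q → pvGF b root2 s2 q := by
  rintro ⟨h1, h2, h3⟩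
  refine ⟨h1, h2, fun z hz => ⟨(h3 z hz).1, ?_⟩⟩
  rcases (h3 z hz).2 with hin | hde
  · exact Or.inl (h _ hin)
  · exact Or.inr (pvDE_mono h hde)

-- conclusion of the failing-call lemma pvHL_false
def pvHLFalseConcl (b : List String) (row col : Int)
    (s s' : List (Int × Int)) : Prop :=
  s ⊆ s' ∧ s'.Nodup ∧ (∀ q ∈ s', q ∈ s ∨ (pvInB b q ∧ pvAt b q ≠ '.')) ∧
  (∀ q, (q = (row, col) ∨ (q ∈ s' ∧ q ∉ s)) → pvGF b (row, col) s' q) ∧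
  ((row, col) ∈ s' ∨
    (s' = s ∧ ∀ z, pvElig b (row, col) z → pvAt b z ≠ '.' ∧ z ∈ s))

-- conclusion of the analysis of has_liberty's failing neighbour loop
def pvFoldConcl (b : List String) (row col : Int) (offs : List (Int × Int))
    (t s' : List (Int × Int)) : Prop :=
  t ⊆ s' ∧ s'.Nodup ∧ (∀ q ∈ s', q ∈ t ∨ (pvInB b q ∧ pvAt b q ≠ '.')) ∧
  (∀ q, q ∈ s' → q ∉ t → q ≠ (row, col) → pvGF b (row, col) s' q) ∧
  (∀ off ∈ offs, (off.1 = 0 ∨ off.2 = 0) → off.1 ≠ off.2 →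
    pvInB b (row + off.1, col + off.2) →
    (pvAt b (row + off.1, col + off.2) = pvAt b (row, col) ∨
     pvAt b (row + off.1, col + off.2) = '.') →
    pvAt b (row + off.1, col + off.2) ≠ '.' ∧
      ((row + off.1, col + off.2) ∈ s' ∨
       (pvDE b (fun y => y ∈ s' ∨ y = (row, col)) (row + off.1, col + off.2) ∧
        (row, col) ∈ s'))) ∧
  ((row, col) ∈ s' ∨ s' = t)

lemma pvFold_false (b : List String) (fuel : Nat) (row col : Int)
    (s0 : List (Int × Int))
    (IH : ∀ (row col : Int) (s s' : List (Int × Int)),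
      pvHL b fuel row col s = (false, s') →
      pvInB b (row, col) → (row, col) ∉ s →
      (∀ q ∈ s, pvInB b q ∧ pvAt b q ≠ '.') → s.Nodup →
      pvH b * pvW b + 1 ≤ (fuel : Int) + s.length →
      pvHLFalseConcl b row col s s')
    (hin : pvInB b (row, col)) (hstone : pvAt b (row, col) ≠ '.')
    (hs0nd : s0.Nodup) (hs0root : (row, col) ∉ s0)
    (hfuel : pvH b * pvW b + 1 ≤ (fuel : Int) + s0.length + 1) :
    ∀ (offs : List (Int × Int)) (t s' : List (Int × Int)), t.Nodup → s0 ⊆ t →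
    (∀ q ∈ t, pvInB b q ∧ pvAt b q ≠ '.') →
    offs.foldl (pvHLStep b row col (pvHL b fuel)) (false, t) = (false, s') →
    pvFoldConcl b row col offs t s' := by
  intro offs
  induction offs with
  | nil =>
    intro t s' hnd hsub hinv h
    simp only [List.foldl_nil] at h
    cases h
    exact ⟨fun x hx => hx, hnd, fun q hq => Or.inl hq,
      fun q hq hq2 _ => absurd hq hq2, by simp, Or.inr rfl⟩
  | cons off offs ihoffs =>
    intro t s' hnd hsub hinv h
    rw [List.foldl_cons, pvHLStep_false] at h
    by_cases hg : (off.1 = 0 ∨ off.2 = 0) ∧ off.1 ≠ off.2 ∧ pvGuard b row col off t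
    · -- the guard passed: the Python recursed into q₀ := (row+off.1, col+off.2)
      rw [if_pos hg] at h
      rcases hg with ⟨hreal, hne, hbd1, hbd2, hbd3, hbd4, hcolor, hmem⟩
      rcases hrec : pvHL b fuel (row + off.1) (col + off.2)
          (PySem.Set.add t (row, col)) with ⟨bb, t₁⟩
      rw [hrec] at h
      cases bb with
      | true => rw [pvFold_pass] at h; cases h
      | false =>
        -- facts about the recursive call
        have hq0ne : (row + off.1, col + off.2) ≠ (row, col) := by
          intro hcontra
          rw [Prod.ext_iff] at hcontra
          simp only at hcontra
          rcases hreal with h0 | h0 <;> [skip; skip] <;> omega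
        have haddnd : (PySem.Set.add t (row, col)).Nodup :=
          PySem.Set.nodup_add t (row, col) hnd
        have haddinv : ∀ q ∈ PySem.Set.add t (row, col),
            pvInB b q ∧ pvAt b q ≠ '.' := by
          intro q hq
          rcases (PySem.Set.mem_add t (row, col) q).mp hq with hq | rfl
          · exact hinv q hq
          · exact ⟨hin, hstone⟩
        have hq0notmem : (row + off.1, col + off.2) ∉ PySem.Set.add t (row, col) := by
          intro hc
          rcases (PySem.Set.mem_add t (row, col) _).mp hc with hc | hc
          · exact hmem hc
          · exact hq0ne hc
        have hq0in : pvInB b (row + off.1, col + off.2) := ⟨hbd1, hbd2, hbd3, hbd4⟩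
        have hlen := pvAddLen hs0nd hnd hsub hs0root (p := (row, col))
        have hsubfuel : pvH b * pvW b + 1 ≤
            (fuel : Int) + (PySem.Set.add t (row, col)).length := by
          have : (s0.length : Int) + 1 ≤ ((PySem.Set.add t (row, col)).length : Int) := by
            exact_mod_cast hlen
          omega
        have hsubc := IH (row + off.1) (col + off.2) _ t₁ hrec hq0in hq0notmem
          haddinv haddnd hsubfuel
        rcases hsubc with ⟨hsub1, hnd1, hnew1, hgf1, hlast1⟩
        have htsub1 : t ⊆ t₁ := fun x hx =>
          hsub1 ((PySem.Set.mem_add t (row, col) x).mpr (Or.inl hx))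
        have hroot1 : (row, col) ∈ t₁ :=
          hsub1 ((PySem.Set.mem_add t (row, col) _).mpr (Or.inr rfl))
        have hinv1 : ∀ q ∈ t₁, pvInB b q ∧ pvAt b q ≠ '.' := by
          intro q hq
          rcases hnew1 q hq with hq' | hq'
          · exact haddinv q hq'
          · exact hq'
        -- continue with the remaining offsets
        have hrest := ihoffs t₁ s' hnd1 (fun x hx => htsub1 (hsub hx)) hinv1 h
        rcases hrest with ⟨hsub2, hnd2, hnew2, hgf2, hoff2, hlast2⟩
        have hts' : t ⊆ s' := fun x hx => hsub2 (htsub1 hx)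
        have hroots' : (row, col) ∈ s' := hsub2 hroot1
        have ht1s' : ∀ x, x ∈ t₁ → x ∈ s' := fun x hx => hsub2 hx
        have hq0stone : pvAt b (row + off.1, col + off.2) ≠ '.' :=
          (hgf1 _ (Or.inl rfl)).2.1
        have hnew3 : ∀ q ∈ s', q ∈ t ∨ (pvInB b q ∧ pvAt b q ≠ '.') := by
          intro q hq
          rcases hnew2 q hq with hq' | hq'
          · rcases hnew1 q hq' with hq'' | hq''
            · rcases (PySem.Set.mem_add t (row, col) q).mp hq'' with hq3 | rfl
              · exact Or.inl hq3
              · exact Or.inr ⟨hin, hstone⟩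
            · exact Or.inr hq''
          · exact Or.inr hq'
        rcases hlast1 with hq0t1 | ⟨heq, hdec⟩
        · -- the recursive call itself recursed: q₀ ended up in the seen set
          have hembed : ∀ y, (y ∈ t₁ ∨ y = (row + off.1, col + off.2)) →
              (y ∈ s' ∨ y = (row, col)) := by
            intro y hy
            rcases hy with hy | rfl
            · exact Or.inl (ht1s' _ hy)
            · exact Or.inl (ht1s' _ hq0t1)
          refine ⟨hts', hnd2, hnew3, ?_, ?_, Or.inl hroots'⟩
          · intro q hq1 hq2 hq3
            by_cases hqt1 : q ∈ t₁
            · have hqnotadd : q ∉ PySem.Set.add t (row, col) := by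
                intro hc
                rcases (PySem.Set.mem_add t (row, col) q).mp hc with hc | hc
                · exact hq2 hc
                · exact hq3 hc
              exact pvGF_embed hembed (hgf1 q (Or.inr ⟨hqt1, hqnotadd⟩))
            · exact hgf2 q hq1 hqt1 hq3
          · intro o ho hr1 hr2 hinq hcol
            rcases List.mem_cons.mp ho with rfl | ho
            · exact ⟨hq0stone, Or.inl (ht1s' _ hq0t1)⟩
            · exact hoff2 o ho hr1 hr2 hinq hcol
        · -- the recursive call was a dead end: seen unchanged, all its eligible
          -- neighbours were already in the seen set
          subst heq
          refine ⟨hts', hnd2, hnew3, ?_, ?_, Or.inl hroots'⟩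
          · intro q hq1 hq2 hq3
            have hqt1 : q ∉ PySem.Set.add t (row, col) := by
              intro hc
              rcases (PySem.Set.mem_add t (row, col) q).mp hc with hc | hc
              · exact hq2 hc
              · exact hq3 hc
            exact hgf2 q hq1 hqt1 hq3
          · intro o ho hr1 hr2 hinq hcol
            rcases List.mem_cons.mp ho with rfl | ho
            · refine ⟨hq0stone, Or.inr ⟨?_, hroots'⟩⟩
              intro z hz
              rcases hdec z hz with ⟨hz1, hz2⟩
              rcases (PySem.Set.mem_add t (row, col) z).mp hz2 with hz3 | rfl
              · exact ⟨hz1, Or.inl (hts' hz3)⟩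
              · exact ⟨hz1, Or.inr rfl⟩
            · exact hoff2 o ho hr1 hr2 hinq hcol
    · rw [if_neg hg] at h
      have hrest := ihoffs t s' hnd hsub hinv h
      rcases hrest with ⟨hsub2, hnd2, hnew2, hgf2, hoff2, hlast2⟩
      refine ⟨hsub2, hnd2, hnew2, hgf2, ?_, hlast2⟩
      intro o ho hr1 hr2 hinq hcol
      rcases List.mem_cons.mp ho with rfl | ho
      · -- the guard failed although bounds and colour hold: the target was seen
        have hmem : (row + o.1, col + o.2) ∈ t := by
          by_contra hc
          exact hg ⟨hr1, hr2, hinq.1, hinq.2.1, hinq.2.2.1, hinq.2.2.2,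
            by simpa [pvAt] using hcol, hc⟩
        exact ⟨(hinv _ hmem).2, Or.inl (hsub2 hmem)⟩
      · exact hoff2 o ho hr1 hr2 hinq hcol

lemma pvHL_false (b : List String) : ∀ (fuel : Nat) (row col : Int)
    (s s' : List (Int × Int)),
    pvHL b fuel row col s = (false, s') →
    pvInB b (row, col) → (row, col) ∉ s →
    (∀ q ∈ s, pvInB b q ∧ pvAt b q ≠ '.') → s.Nodup →
    pvH b * pvW b + 1 ≤ (fuel : Int) + s.length →
    pvHLFalseConcl b row col s s' := by
  intro fuel
  induction fuel with
  | zero =>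
    intro row col s s' h hin hroot hsinv hsnd hfuel
    have := pvCard hsnd (fun q hq => (hsinv q hq).1)
    simp only [Nat.cast_zero] at hfuel
    omega
  | succ fuel ih =>
    intro row col s s' h hin hroot hsinv hsnd hfuel
    rw [pvHL] at h
    by_cases hdot : pvCell b row col = '.'
    · rw [if_pos hdot] at h; cases h
    · rw [if_neg hdot] at h
      have hstone : pvAt b (row, col) ≠ '.' := by simpa [pvAt] using hdot
      have hfuel' : pvH b * pvW b + 1 ≤ (fuel : Int) + s.length + 1 := by
        push_cast at hfuel ⊢; omega
      have hfold := pvFold_false b fuel row col s ih hin hstone hsnd hroot hfuel'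
        pvOffsets s s' hsnd (fun x hx => hx) hsinv h
      rcases hfold with ⟨c1, c2, c3, c4, c5, c6⟩
      have hrootGF : pvGF b (row, col) s' (row, col) := by
        refine ⟨hin, hstone, fun z hz => ?_⟩
        rcases pvAdj_iff.mp hz.1 with ⟨off, hoffmem, hreal, hne, hzeq⟩
        have hz2 := hz.2.1
        have hz3 := hz.2.2
        rw [hzeq] at hz2 hz3 ⊢
        rcases c5 off hoffmem hreal hne hz2 hz3 with ⟨hzne, hzc⟩
        rcases hzc with hzc | ⟨hde, hrin⟩
        · exact ⟨hzne, Or.inl (Or.inl hzc)⟩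
        · exact ⟨hzne, Or.inr hde⟩
      refine ⟨c1, c2, c3, ?_, ?_⟩
      · intro q hq
        rcases hq with rfl | ⟨hq1, hq2⟩
        · exact hrootGF
        · by_cases hqr : q = (row, col)
          · exact hqr ▸ hrootGF
          · exact c4 q hq1 hq2 hqr
      · rcases c6 with hc | rfl
        · exact Or.inl hc
        · refine Or.inr ⟨rfl, fun z hz => ?_⟩
          rcases pvAdj_iff.mp hz.1 with ⟨off, hoffmem, hreal, hne, hzeq⟩
          have hz2 := hz.2.1
          have hz3 := hz.2.2
          rw [hzeq] at hz2 hz3 ⊢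
          rcases c5 off hoffmem hreal hne hz2 hz3 with ⟨hzne, hzc⟩
          rcases hzc with hzc | ⟨-, hrin⟩
          · exact ⟨hzne, hzc⟩
          · exact absurd hrin hroot

lemma pvA_char (b : List String) (row col : Int) (hin : pvInB b (row, col)) :
    (pvHL b (pvFuel b) row col []).1 = true ↔ pvLib b (row, col) := by
  rcases heq : pvHL b (pvFuel b) row col [] with ⟨bb, s'⟩
  cases bb with
  | true =>
    constructor
    · intro _; exact pvHL_true b (pvFuel b) row col [] s' heq hin
    · intro _; rfl
  | false =>
    have hF : pvHLFalseConcl b row col [] s' := by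
      apply pvHL_false b (pvFuel b) row col [] s' heq hin (by simp) (by simp) (by simp)
      show pvH b * pvW b + 1 ≤ ((pvFuel b : Nat) : Int) + (([] : List (Int × Int)).length : Int)
      simp only [pvFuel, pvH, pvW, List.length_nil]
      push_cast
      omega
    rcases hF with ⟨-, -, c3, c4, -⟩
    have hC : pvClosed b (fun y => y ∈ s' ∨ y = (row, col)) := by
      intro p hp
      have hGF : pvGF b (row, col) s' p := by
        rcases hp with hp | rfl
        · exact c4 p (Or.inr ⟨hp, by simp⟩)
        · exact c4 _ (Or.inl rfl)
      exact ⟨hGF.2.1, hGF.2.2⟩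
    constructor
    · intro h; simp at h
    · intro hlib
      exact absurd (Or.inr rfl) ((pvClosed_noLib hC _ hlib).1)

-- ---------- B side: the saturated alive set = stones that reach a liberty ----------

-- adjacency = one of B's four neighbour offsets
lemma pvAdj_iff_nbrs {p q : Int × Int} :
    pvAdj p q ↔ ∃ d ∈ pvNbrs, q = (p.1 + d.1, p.2 + d.2) := by
  constructor
  · rintro (rfl | rfl | rfl | rfl)
    · exact ⟨(-1, 0), by simp [pvNbrs], by simp; ring⟩
    · exact ⟨(0, -1), by simp [pvNbrs], by simp; ring⟩
    · exact ⟨(0, 1), by simp [pvNbrs], by simp⟩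
    · exact ⟨(1, 0), by simp [pvNbrs], by simp⟩
  · rintro ⟨d, hmem, rfl⟩
    simp [pvNbrs] at hmem
    unfold pvAdj
    rcases hmem with rfl | rfl | rfl | rfl <;> simp_all <;> constructor <;> ring

-- the semantic reading of B's per-cell condition
abbrev pvSCond (b : List String) (al : List (Int × Int)) (r c : Int) : Prop :=
  pvAt b (r, c) ≠ '.' ∧ (r, c) ∉ al ∧ ∃ d ∈ pvNbrs, pvInB b (r + d.1, c + d.2) ∧
    (pvAt b (r + d.1, c + d.2) = '.' ∨
     ((r + d.1, c + d.2) ∈ al ∧ pvAt b (r + d.1, c + d.2) = pvAt b (r, c)))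

lemma pvSweepCell_eq (b : List String) (st : List (Int × Int) × Bool) (r c : Int) :
    pvSweepCell b st r c =
      if pvSCond b st.1 r c then (PySem.Set.add st.1 (r, c), true) else st := by
  have hiff : (pvCell b r c ≠ '.' ∧ (r, c) ∉ st.1 ∧ (pvNbrs.any (fun d =>
       decide (0 ≤ r + d.1 ∧ r + d.1 < (b.length : Int) ∧ 0 ≤ c + d.2 ∧
               c + d.2 < ((b.headD "").length : Int)) &&
       (pvCell b (r + d.1) (c + d.2) == '.' ||
        (decide ((r + d.1, c + d.2) ∈ st.1) &&
         pvCell b (r + d.1) (c + d.2) == pvCell b r c))) = true)) ↔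
      pvSCond b st.1 r c := by
    simp only [pvSCond, pvAt, pvInB, pvH, pvW, List.any_eq_true, Bool.and_eq_true,
      Bool.or_eq_true, decide_eq_true_eq, beq_iff_eq]
  rw [pvSweepCell]
  by_cases h : pvSCond b st.1 r c
  · rw [if_pos (hiff.mpr h), if_pos h]
  · rw [if_neg (fun hc => h (hiff.mp hc)), if_neg h]

-- the sweep as one fold over the list of all cells
abbrev pvSF (b : List String) (st : List (Int × Int) × Bool) (p : Int × Int) :
    List (Int × Int) × Bool := pvSweepCell b st p.1 p.2

lemma pvSF_eq (b : List String) (st : List (Int × Int) × Bool) (p : Int × Int) :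
    pvSF b st p =
      if pvSCond b st.1 p.1 p.2 then (PySem.Set.add st.1 (p.1, p.2), true) else st :=
  pvSweepCell_eq b st p.1 p.2

def pvCells (b : List String) : List (Int × Int) :=
  (PySem.List.pyRange 0 (b.length : Int) 1).flatMap
    (fun r => (PySem.List.pyRange 0 ((b.headD "").length : Int) 1).map (fun c => (r, c)))

lemma pvSweep_eq_foldl (b : List String) (al : List (Int × Int)) :
    pvSweep b al = (pvCells b).foldl (pvSF b) (al, false) := by
  rw [pvSweep, pvCells, List.foldl_flatMap]
  congr 1
  funext st r
  rw [List.foldl_map]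

lemma pvCells_inB (b : List String) : ∀ p ∈ pvCells b, pvInB b p := by
  intro p hp
  rcases List.mem_flatMap.mp hp with ⟨r, hr, hc⟩
  rcases List.mem_map.mp hc with ⟨c, hcm, rfl⟩
  exact ⟨(PySem.List.mem_pyRange_one.mp hr).1, (PySem.List.mem_pyRange_one.mp hr).2,
    (PySem.List.mem_pyRange_one.mp hcm).1, (PySem.List.mem_pyRange_one.mp hcm).2⟩

lemma pvMemCells (b : List String) {p : Int × Int} (hp : pvInB b p) :
    p ∈ pvCells b := by
  rcases hp with ⟨h1, h2, h3, h4⟩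
  refine List.mem_flatMap.mpr ⟨p.1, ?_, List.mem_map.mpr ⟨p.2, ?_, rfl⟩⟩
  · exact (PySem.List.mem_pyRange_one).mpr ⟨h1, h2⟩
  · exact (PySem.List.mem_pyRange_one).mpr ⟨h3, h4⟩

lemma pvAddLen2 {al : List (Int × Int)} {p : Int × Int} (h : p ∉ al) :
    (PySem.Set.add al p).length = al.length + 1 := by
  unfold PySem.Set.add
  rw [if_neg (fun hc => h ((PySem.Set.contains_iff al p).mp hc))]
  simp

lemma pvAddLenLe (al : List (Int × Int)) (p : Int × Int) :
    al.length ≤ (PySem.Set.add al p).length := by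
  unfold PySem.Set.add
  split_ifs <;> simp

lemma pvSF_mono (b : List String) : ∀ (L : List (Int × Int))
    (st : List (Int × Int) × Bool),
    st.1 ⊆ (L.foldl (pvSF b) st).1 ∧ st.1.length ≤ (L.foldl (pvSF b) st).1.length ∧
    (st.2 = true → (L.foldl (pvSF b) st).2 = true) := by
  intro L
  induction L with
  | nil => intro st; exact ⟨fun x hx => hx, le_refl _, fun h => h⟩
  | cons p L ih =>
    intro st
    rw [List.foldl_cons, pvSF_eq]
    split_ifs with h
    · rcases ih (PySem.Set.add st.1 (p.1, p.2), true) with ⟨ih1, ih2, ih3⟩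
      refine ⟨fun x hx => ih1 ?_, ?_, fun _ => ih3 rfl⟩
      · exact (PySem.Set.mem_add st.1 (p.1, p.2) x).mpr (Or.inl hx)
      · exact le_trans (pvAddLenLe st.1 (p.1, p.2)) ih2
    · exact ih st

lemma pvSF_nodup (b : List String) : ∀ (L : List (Int × Int))
    (st : List (Int × Int) × Bool), st.1.Nodup → (L.foldl (pvSF b) st).1.Nodup := by
  intro L
  induction L with
  | nil => intro st h; exact h
  | cons p L ih =>
    intro st h
    rw [List.foldl_cons, pvSF_eq]
    split_ifs with hc
    · exact ih _ (PySem.Set.nodup_add st.1 _ h)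
    · exact ih st h

lemma pvSF_sound (b : List String) : ∀ (L : List (Int × Int))
    (st : List (Int × Int) × Bool),
    (∀ q ∈ st.1, pvInB b q ∧ pvAt b q ≠ '.' ∧ pvLib b q) →
    (∀ p ∈ L, pvInB b p) →
    ∀ q ∈ (L.foldl (pvSF b) st).1, pvInB b q ∧ pvAt b q ≠ '.' ∧ pvLib b q := by
  intro L
  induction L with
  | nil => intro st h _; exact h
  | cons p L ih =>
    intro st hst hL
    rw [List.foldl_cons, pvSF_eq]
    split_ifs with hc
    · apply ih
      · intro q hq
        rcases (PySem.Set.mem_add st.1 (p.1, p.2) q).mp hq with hq | rfl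
        · exact hst q hq
        · -- the newly added cell: its triggering neighbour shows it is alive
          rcases hc with ⟨hstone, hnot, d, hd, hdin, hdcase⟩
          have hpin : pvInB b p := hL p (by simp)
          have hadj : pvAdj (p.1, p.2) (p.1 + d.1, p.2 + d.2) :=
            pvAdj_iff_nbrs.mpr ⟨d, hd, rfl⟩
          have hlibq : pvLib b (p.1 + d.1, p.2 + d.2) := by
            rcases hdcase with hdot | ⟨hmem, -⟩
            · exact pvLib.dot _ hdin hdot
            · exact (hst _ hmem).2.2
          have hcol : pvAt b (p.1 + d.1, p.2 + d.2) = pvAt b (p.1, p.2) ∨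
              pvAt b (p.1 + d.1, p.2 + d.2) = '.' := by
            rcases hdcase with hdot | ⟨-, hsame⟩
            · exact Or.inr hdot
            · exact Or.inl hsame
          exact ⟨hpin, hstone,
            pvLib.step _ _ hpin hstone ⟨hadj, hdin, hcol⟩ hlibq⟩
      · intro q hq; exact hL q (by simp [hq])
    · exact ih st hst (fun q hq => hL q (by simp [hq]))

lemma pvSF_false (b : List String) : ∀ (L : List (Int × Int))
    (st : List (Int × Int) × Bool), (L.foldl (pvSF b) st).2 = false →
    (L.foldl (pvSF b) st).1 = st.1 ∧ st.2 = false ∧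
      ∀ p ∈ L, ¬ pvSCond b st.1 p.1 p.2 := by
  intro L
  induction L with
  | nil => intro st h; exact ⟨rfl, h, by simp⟩
  | cons p L ih =>
    intro st h
    rw [List.foldl_cons, pvSF_eq] at h
    rw [List.foldl_cons, pvSF_eq]
    split_ifs with hc
    · exfalso
      rw [if_pos hc] at h
      have := (pvSF_mono b L (PySem.Set.add st.1 (p.1, p.2), true)).2.2 rfl
      rw [this] at h
      cases h
    · rw [if_neg hc] at h
      rcases ih st h with ⟨ih1, ih2, ih3⟩
      refine ⟨ih1, ih2, ?_⟩
      intro q hq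
      rcases List.mem_cons.mp hq with rfl | hq
      · exact hc
      · exact ih3 q hq

lemma pvSF_grow (b : List String) : ∀ (L : List (Int × Int))
    (st : List (Int × Int) × Bool), st.1.Nodup → (L.foldl (pvSF b) st).2 = true →
    st.2 = true ∨ st.1.length < (L.foldl (pvSF b) st).1.length := by
  intro L
  induction L with
  | nil => intro st _ h; exact Or.inl h
  | cons p L ih =>
    intro st hnd h
    rw [List.foldl_cons, pvSF_eq] at h ⊢
    split_ifs with hc
    · right
      have hlen := (pvSF_mono b L (PySem.Set.add st.1 (p.1, p.2), true)).2.1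
      have h2 : (PySem.Set.add st.1 (p.1, p.2)).length = st.1.length + 1 :=
        pvAddLen2 hc.2.1
      simp only at hlen
      omega
    · rw [if_neg hc] at h
      exact ih st hnd h

lemma pvLoopB_props (b : List String) : ∀ (fuel : Nat) (al : List (Int × Int)),
    al.Nodup → (∀ q ∈ al, pvInB b q ∧ pvAt b q ≠ '.' ∧ pvLib b q) →
    pvH b * pvW b + 1 ≤ (fuel : Int) + al.length →
    (∀ q ∈ pvLoopB b fuel al, pvInB b q ∧ pvAt b q ≠ '.' ∧ pvLib b q) ∧
    (∀ p, pvInB b p → ¬ pvSCond b (pvLoopB b fuel al) p.1 p.2) := by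
  intro fuel
  induction fuel with
  | zero =>
    intro al hnd hsound hfuel
    have := pvCard hnd (fun q hq => (hsound q hq).1)
    simp only [Nat.cast_zero] at hfuel
    omega
  | succ fuel ih =>
    intro al hnd hsound hfuel
    rw [pvLoopB]
    rcases hsw : pvSweep b al with ⟨al₁, ch⟩
    have hsw' := hsw
    rw [pvSweep_eq_foldl] at hsw'
    cases ch with
    | true =>
      have hnd1 : al₁.Nodup := by
        have h := pvSF_nodup b (pvCells b) (al, false) (by simpa using hnd)
        rw [hsw'] at h; exact h
      have hsound1 : ∀ q ∈ al₁, pvInB b q ∧ pvAt b q ≠ '.' ∧ pvLib b q := by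
        have h := pvSF_sound b (pvCells b) (al, false) (by simpa using hsound)
          (pvCells_inB b)
        rw [hsw'] at h; exact h
      have hgrow : al.length < al₁.length := by
        have h := pvSF_grow b (pvCells b) (al, false) (by simpa using hnd)
        rw [hsw'] at h
        rcases h rfl with h | h
        · cases h
        · exact h
      exact ih al₁ hnd1 hsound1 (by push_cast at hfuel ⊢; omega)
    | false =>
      have h := pvSF_false b (pvCells b) (al, false)
      rw [hsw'] at h
      rcases h rfl with ⟨heq, -, hfix⟩
      subst heq
      exact ⟨hsound, fun p hp => hfix p (pvMemCells b hp)⟩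

lemma pvLoopB_char (b : List String) (p : Int × Int) (hin : pvInB b p) :
    p ∈ pvLoopB b (pvFuel b) [] ↔ (pvAt b p ≠ '.' ∧ pvLib b p) := by
  have hfuel : pvH b * pvW b + 1 ≤ ((pvFuel b : Nat) : Int) +
      (([] : List (Int × Int)).length : Int) := by
    simp only [pvFuel, pvH, pvW, List.length_nil]
    push_cast
    omega
  rcases pvLoopB_props b (pvFuel b) [] (by simp) (by simp) (by simpa using hfuel) with
    ⟨hsound, hfix⟩
  constructor
  · intro hmem
    exact ⟨(hsound p hmem).2.1, (hsound p hmem).2.2⟩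
  · rintro ⟨hstone, hlib⟩
    -- a stone that reaches a liberty must be in the saturated set
    induction hlib with
    | dot q hq hdot => exact absurd hdot hstone
    | step q z hqin hqstone helig hlibz ihz =>
      by_contra hnot
      apply hfix q hqin
      rcases pvAdj_iff_nbrs.mp helig.1 with ⟨d, hd, hzeq⟩
      refine ⟨hqstone, by simpa using hnot, d, hd, by rw [← hzeq]; exact helig.2.1, ?_⟩
      by_cases hzdot : pvAt b z = '.'
      · left; rw [← hzeq]; exact hzdot
      · right
        rw [← hzeq]
        refine ⟨ihz helig.2.1 hzdot, ?_⟩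
        · rcases helig.2.2 with h | h
          · exact h
          · exact absurd h hzdot

-- ---------- assembling the two builders ----------

lemma pvFoldAppend {α β : Type} (f : α → β) (l : List α) :
    ∀ acc : List β, l.foldl (fun out x => out ++ [f x]) acc = acc ++ l.map f := by
  induction l with
  | nil => intro acc; simp
  | cons x l ih => intro acc; rw [List.foldl_cons, ih]; simp

lemma pvFoldPush (g : Int → Char) (l : List Int) :
    ∀ cs : List Char, l.foldl (fun row c => row.push (g c)) (String.ofList cs) =
      String.ofList (cs ++ l.map g) := by
  induction l with
  | nil => intro cs; simp
  | cons x l ih =>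
    intro cs
    rw [List.foldl_cons]
    have hpush : (String.ofList cs).push (g x) = String.ofList (cs ++ [g x]) := by
      apply String.toList_inj.mp
      rw [String.toList_push, String.toList_ofList, String.toList_ofList]
    rw [hpush, ih]
    simp

-- the character the two programs place at an in-bounds cell is the same
lemma pvCellEq (b : List String) (color : String) (r c : Int)
    (hin : pvInB b (r, c)) :
    (if (pvHL b (pvFuel b) r c []).1 = false ∧ String.ofList [pvCell b r c] = color
     then '.' else pvCell b r c) =
    (if String.ofList [pvCell b r c] = color ∧ (r, c) ∉ pvLoopB b (pvFuel b) []
     then '.' else pvCell b r c) := by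
  have hchar := pvA_char b r c hin
  have hloop := pvLoopB_char b (r, c) hin
  by_cases hdot : pvCell b r c = '.'
  · have hlib : pvLib b (r, c) := pvLib.dot _ hin (by simpa [pvAt] using hdot)
    have htrue : (pvHL b (pvFuel b) r c []).1 = true := hchar.mpr hlib
    rw [if_neg (by simp [htrue])]
    split_ifs with h
    · rw [hdot]
    · rfl
  · have hstone : pvAt b (r, c) ≠ '.' := by simpa [pvAt] using hdot
    by_cases hlib : pvLib b (r, c)
    · have htrue : (pvHL b (pvFuel b) r c []).1 = true := hchar.mpr hlib
      have hmem : (r, c) ∈ pvLoopB b (pvFuel b) [] := hloop.mpr ⟨hstone, hlib⟩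
      rw [if_neg (by simp [htrue]), if_neg (by simp [hmem])]
    · have hfalse : (pvHL b (pvFuel b) r c []).1 = false := by
        rcases Bool.eq_false_or_eq_true (pvHL b (pvFuel b) r c []).1 with h | h
        · exact absurd (hchar.mp h) hlib
        · exact h
      have hnmem : (r, c) ∉ pvLoopB b (pvFuel b) [] := fun hm => hlib (hloop.mp hm).2
      by_cases hcol : String.ofList [pvCell b r c] = color
      · rw [if_pos ⟨hfalse, hcol⟩, if_pos ⟨hcol, hnmem⟩]
      · rw [if_neg (by tauto), if_neg (by tauto)]

-- ===== VERDICT (by name: the statement is the Claim_ definition above) =====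
theorem capture_spec : Claim_equal_capture := by
  intro board color _ _
  show capture board color = capture_alt board color
  by_cases h0 : board.length = 0
  · have hb : board = [] := List.eq_nil_of_length_eq_zero h0
    subst hb
    rfl
  · rw [capture, capture_alt, if_neg h0, pvFoldAppend, List.nil_append]
    apply List.map_congr_left
    intro r hr
    have hrb := PySem.List.mem_pyRange_one.mp hr
    have h1 : ("" : String) = String.ofList [] := rfl
    have h2 : (fun (row : String) (c : Int) =>
        if (pvHL board (pvFuel board) r c []).1 = false ∧
            String.ofList [pvCell board r c] = color
        then row.push '.' else row.push (pvCell board r c)) =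
        (fun (row : String) (c : Int) => row.push
          (if (pvHL board (pvFuel board) r c []).1 = false ∧
              String.ofList [pvCell board r c] = color
           then '.' else pvCell board r c)) := by
      funext row c
      split_ifs <;> rfl
    rw [h1, h2, pvFoldPush, List.nil_append]
    congr 1
    apply List.map_congr_left
    intro c hc
    have hcb := PySem.List.mem_pyRange_one.mp hc
    exact pvCellEq board color r c ⟨hrb.1, hrb.2, hcb.1, hcb.2⟩
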